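-- pv_equiv track=rewrite | github.com/carlos01ep/slatamcvrp | scrapinglatam/latam_lead_crawler_serpapi2.py | pick_best_email
-- ===== SOURCE A (Python) =====
-- EMAIL_AVOID = ("noreply", "no-reply", "donotreply", "do-not-reply", "webmaster", "postmaster", "abuse")
--
-- EMAIL_PREFER = ("contacto", "contact", "info", "comercial", "ventas", "sales", "admisiones", "secretaria", "general", "prensa", "comunicacion", "informes")
--
-- def pick_best_email(emails, domain):
--     if not emails:
--         return ""
--     scored = []
--     for e in emails:
--         low = e.lower()
--         if any(bad in low for bad in EMAIL_AVOID):
--             continue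
--         prefer_score = -1
--         for idx, kw in enumerate(EMAIL_PREFER):
--             if kw in low:
--                 prefer_score = idx
--                 break
--         same_domain = 0
--         try:
--             if domain and low.endswith("@" + domain):
--                 same_domain = -1
--         except Exception:
--             pass
--         local_len = len(low.split("@")[0])
--         scored.append((prefer_score, same_domain, local_len, e))
--     if not scored:
--         return emails[0]
--     scored.sort(key=lambda t: (t[0] if t[0] >= 0 else 999, t[1], t[2]))
--     return scored[0][3]
-- ===== SOURCE B (Python) =====
-- EMAIL_AVOID = ("noreply", "no-reply", "donotreply", "do-not-reply", "webmaster", "postmaster", "abuse")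
--
-- EMAIL_PREFER = ("contacto", "contact", "info", "comercial", "ventas", "sales", "admisiones", "secretaria", "general", "prensa", "comunicacion", "informes")
--
--
-- def _key(e, domain):
--     """Score one email; None means 'avoided'."""
--     low = e.lower()
--     if any(bad in low for bad in EMAIL_AVOID):
--         return None
--     prefer = next((i for i, kw in enumerate(EMAIL_PREFER) if kw in low), 999)
--     same = -1 if domain and low.endswith("@" + domain) else 0
--     return (prefer, same, len(low.split("@")[0]))
--
--
-- def pick_best_email(emails, domain):
--     if not emails:
--         return ""
--     best = None  # (key, email)
--     for e in emails:
--         k = _key(e, domain)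
--         if k is None:
--             continue
--         if best is None or k < best[0]:
--             best = (k, e)
--     return best[1] if best is not None else emails[0]
-- ===== Notes on version B (the rewrite author's own statement) =====
-- stated objective: simpler
-- what changed: Replaces A's build-a-scored-list-then-stable-sort-and-take-head with a single linear pass that keeps the best (key, email) pair under strict-< comparison (ties keep the earliest email, matching the stable sort), with the prefer score normalised to 999 up front.
import Mathlib
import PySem

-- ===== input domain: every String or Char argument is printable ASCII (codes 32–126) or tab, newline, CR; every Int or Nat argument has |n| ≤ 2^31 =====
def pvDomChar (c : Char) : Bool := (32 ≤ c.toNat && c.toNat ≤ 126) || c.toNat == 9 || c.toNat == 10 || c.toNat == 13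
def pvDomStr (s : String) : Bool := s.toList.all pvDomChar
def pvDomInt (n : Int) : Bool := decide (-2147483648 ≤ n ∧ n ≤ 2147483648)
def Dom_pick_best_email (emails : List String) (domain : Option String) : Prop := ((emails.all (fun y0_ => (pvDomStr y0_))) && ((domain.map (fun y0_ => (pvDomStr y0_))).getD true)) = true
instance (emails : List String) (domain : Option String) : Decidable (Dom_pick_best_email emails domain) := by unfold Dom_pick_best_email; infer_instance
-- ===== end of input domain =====

-- B replaces A's build-score-list-then-stable-sort by a single linear pass keeping the
-- strictly-best (key, email) pair, so no intermediate list and no sort (objective: simpler).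

def EMAIL_AVOID : List String :=
  ["noreply", "no-reply", "donotreply", "do-not-reply", "webmaster", "postmaster", "abuse"]

def EMAIL_PREFER : List String :=
  ["contacto", "contact", "info", "comercial", "ventas", "sales", "admisiones",
   "secretaria", "general", "prensa", "comunicacion", "informes"]

-- ===== PORT A =====
-- A's inner `for idx, kw in enumerate(EMAIL_PREFER): if kw in low: …; break` loop
def preferLoopA : List (Int × String) → String → Int
  | [], _ => -1
  | (idx, kw) :: rest, low =>
      if PySem.Str.isIn kw low then idx else preferLoopA rest low

-- `if domain and low.endswith("@" + domain)` (try/except never fires for string/None domain)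
def sameDomainA (domain : Option String) (low : String) : Int :=
  match domain with
  | some d => if d ≠ "" ∧ PySem.Str.endswith low ("@" ++ d) = true then -1 else 0
  | none => 0

-- `len(low.split("@")[0])`; split("@") is never empty, so [0] is its head
def localLenA (low : String) : Int :=
  PySem.Str.len (((PySem.Str.split? low "@").getD []).headD "")

-- sort key `(t[0] if t[0] >= 0 else 999, t[1], t[2])`; Python tuple `<` is lexicographic
def keyA (t : Int × Int × Int × String) : Int ×ₗ Int ×ₗ Int :=
  toLex ((if t.1 ≥ 0 then t.1 else 999), toLex (t.2.1, t.2.2.1))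

def pick_best_email (emails : List String) (domain : Option String) : String :=
  if emails = [] then ""
  else
    let scored := emails.foldl (fun acc e =>
      let low := PySem.Str.lower e
      if EMAIL_AVOID.any (fun bad => PySem.Str.isIn bad low) then acc
      else acc ++ [(preferLoopA (PySem.List.enumerate EMAIL_PREFER) low,
                    sameDomainA domain low, localLenA low, e)]) []
    if scored = [] then emails.headD ""
    else ((PySem.List.sorted scored keyA false).headD (0, 0, 0, "")).2.2.2

-- ===== PORT B =====
-- Source B's `_key(e, domain)`: None when avoided, else the normalised score triple
def emailKeyB (domain : Option String) (e : String) : Option (Int ×ₗ Int ×ₗ Int) :=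
  let low := PySem.Str.lower e
  if EMAIL_AVOID.any (fun bad => PySem.Str.isIn bad low) then none
  else
    let prefer : Int :=
      match EMAIL_PREFER.findIdx? (fun kw => PySem.Str.isIn kw low) with
      | some i => (i : Int)
      | none => 999
    let same : Int :=
      match domain with
      | some d => if d ≠ "" ∧ PySem.Str.endswith low ("@" ++ d) = true then -1 else 0
      | none => 0
    some (toLex (prefer, toLex (same, PySem.Str.len (((PySem.Str.split? low "@").getD []).headD ""))))

-- the loop body: keep `best` unless this email scores strictly better
def stepB (domain : Option String) (best : Option ((Int ×ₗ Int ×ₗ Int) × String))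
    (e : String) : Option ((Int ×ₗ Int ×ₗ Int) × String) :=
  match emailKeyB domain e with
  | none => best
  | some k =>
    match best with
    | none => some (k, e)
    | some (bk, be) => if k < bk then some (k, e) else some (bk, be)

def pick_best_email_alt (emails : List String) (domain : Option String) : String :=
  match emails with
  | [] => ""
  | first :: _ =>
    match emails.foldl (stepB domain) none with
    | none => first
    | some (_, e) => e

-- ===== PRECONDITION & SPEC =====
def Spec_pick_best_email (emails : List String) (domain : Option String) (out : String) : Prop := out = pick_best_email_alt emails domain
instance (emails : List String) (domain : Option String) (out : String) : Decidable (Spec_pick_best_email emails domain out) := by unfold Spec_pick_best_email; infer_instance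

-- ===== CLAIM (what is proved, stated in full; the proofs are below) =====
def Claim_equal_pick_best_email : Prop := ∀ (emails : List String) (domain : Option String), Dom_pick_best_email emails domain → Spec_pick_best_email emails domain (pick_best_email emails domain)

-- ===== LEMMAS AND PROOFS =====

-- A's per-email scoring, as an Option (proof-only helper)
def entryA (domain : Option String) (e : String) : Option (Int × Int × Int × String) :=
  let low := PySem.Str.lower e
  if EMAIL_AVOID.any (fun bad => PySem.Str.isIn bad low) then none
  else some (preferLoopA (PySem.List.enumerate EMAIL_PREFER) low,
             sameDomainA domain low, localLenA low, e)

-- projection of an A-entry to B's (key, email) pair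
def fKE (t : Int × Int × Int × String) : (Int ×ₗ Int ×ₗ Int) × String := (keyA t, t.2.2.2)

-- B's comparison step on already-scored pairs
def step2 (best : Option ((Int ×ₗ Int ×ₗ Int) × String))
    (p : (Int ×ₗ Int ×ₗ Int) × String) : Option ((Int ×ₗ Int ×ₗ Int) × String) :=
  match best with
  | none => some p
  | some (bk, be) => if p.1 < bk then some p else some (bk, be)

lemma preferLoopA_eq (low : String) : ∀ (xs : List String) (s : Int),
    preferLoopA (PySem.List.enumerate xs s) low
    = (match xs.findIdx? (fun kw => PySem.Str.isIn kw low) with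
        | some i => s + (i : Int)
        | none => -1) := by
  intro xs
  induction xs with
  | nil => intro s; rfl
  | cons x xs ih =>
    intro s
    rw [PySem.List.enumerate_cons]
    simp only [preferLoopA, List.findIdx?_cons]
    by_cases h : PySem.Str.isIn x low = true
    · rw [if_pos h, if_pos h]
      simp
    · rw [if_neg h, if_neg h, ih (s + 1)]
      cases hf : xs.findIdx? (fun kw => PySem.Str.isIn kw low) with
      | none => rfl
      | some i => simp only [Option.map_some]; push_cast; ring

lemma prefer_norm (low : String) :
    (match EMAIL_PREFER.findIdx? (fun kw => PySem.Str.isIn kw low) with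
      | some i => (i : Int)
      | none => 999)
    = (if preferLoopA (PySem.List.enumerate EMAIL_PREFER) low ≥ 0
        then preferLoopA (PySem.List.enumerate EMAIL_PREFER) low else 999) := by
  rw [preferLoopA_eq low EMAIL_PREFER 0]
  cases EMAIL_PREFER.findIdx? (fun kw => PySem.Str.isIn kw low) with
  | none => simp
  | some i => simp

lemma entryA_none (domain : Option String) (e : String)
    (h : (EMAIL_AVOID.any fun bad => PySem.Str.isIn bad (PySem.Str.lower e)) = true) :
    entryA domain e = none := by
  simp only [entryA, h, if_pos]

lemma entryA_some (domain : Option String) (e : String)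
    (h : ¬ (EMAIL_AVOID.any fun bad => PySem.Str.isIn bad (PySem.Str.lower e)) = true) :
    entryA domain e = some (preferLoopA (PySem.List.enumerate EMAIL_PREFER) (PySem.Str.lower e),
      sameDomainA domain (PySem.Str.lower e), localLenA (PySem.Str.lower e), e) := by
  simp only [entryA, h, if_neg, Bool.not_eq_true]

lemma pointwise_key (domain : Option String) (e : String) :
    (emailKeyB domain e).map (fun k => (k, e)) = (entryA domain e).map fKE := by
  by_cases h : (EMAIL_AVOID.any fun bad => PySem.Str.isIn bad (PySem.Str.lower e)) = true
  · rw [entryA_none domain e h]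
    simp only [emailKeyB, h, if_pos, Option.map_none]
  · rw [entryA_some domain e h]
    simp only [emailKeyB, h, if_neg, Bool.not_eq_true, Option.map_some, fKE, keyA,
      sameDomainA, localLenA, prefer_norm (PySem.Str.lower e)]

lemma scoredA_eq (domain : Option String) : ∀ (emails : List String)
    (acc : List (Int × Int × Int × String)),
    emails.foldl (fun acc e =>
      let low := PySem.Str.lower e
      if EMAIL_AVOID.any (fun bad => PySem.Str.isIn bad low) then acc
      else acc ++ [(preferLoopA (PySem.List.enumerate EMAIL_PREFER) low,
                    sameDomainA domain low, localLenA low, e)]) acc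
    = acc ++ emails.filterMap (entryA domain) := by
  intro emails
  induction emails with
  | nil => intro acc; simp
  | cons e es ih =>
    intro acc
    simp only [List.foldl_cons, List.filterMap_cons]
    by_cases h : (EMAIL_AVOID.any fun bad => PySem.Str.isIn bad (PySem.Str.lower e)) = true
    · rw [entryA_none domain e h]
      simp only [h, if_pos, ih]
    · rw [entryA_some domain e h]
      simp only [h, if_neg, Bool.not_eq_true, ih]
      simp

lemma foldB_eq (domain : Option String) :
    ∀ (es : List String) (acc : Option ((Int ×ₗ Int ×ₗ Int) × String)),
    es.foldl (stepB domain) acc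
    = (es.filterMap (fun e => (emailKeyB domain e).map (fun k => (k, e)))).foldl step2 acc := by
  intro es
  induction es with
  | nil => intro acc; rfl
  | cons e es ih =>
    intro acc
    simp only [List.foldl_cons, List.filterMap_cons]
    cases hg : emailKeyB domain e with
    | none => simp only [stepB, hg]; exact ih acc
    | some k =>
      simp only [stepB, step2, hg, Option.map_some, List.foldl_cons]
      cases acc <;> exact ih _

lemma foldMin_some : ∀ (ps : List ((Int ×ₗ Int ×ₗ Int) × String))
    (b : (Int ×ₗ Int ×ₗ Int) × String),
    ps.foldl step2 (some b)
    = some (ps.foldl (fun b p => if p.1 < b.1 then p else b) b) := by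
  intro ps
  induction ps with
  | nil => intro b; rfl
  | cons p ps ih =>
    intro b
    simp only [List.foldl_cons, step2]
    by_cases h : p.1 < b.1 <;> simp only [h, if_true, if_false] <;> exact ih _

lemma foldMin_map : ∀ (ts : List (Int × Int × Int × String)) (b : Int × Int × Int × String),
    (ts.map fKE).foldl (fun b p => if p.1 < b.1 then p else b) (fKE b)
    = fKE (ts.foldl (fun b t => if keyA t < keyA b then t else b) b) := by
  intro ts
  induction ts with
  | nil => intro b; rfl
  | cons t ts ih =>
    intro b
    simp only [List.map_cons, List.foldl_cons]
    by_cases h : keyA t < keyA b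
    · rw [if_pos (show (fKE t).1 < (fKE b).1 from h), if_pos h]
      exact ih t
    · rw [if_neg (show ¬ (fKE t).1 < (fKE b).1 from h), if_neg h]
      exact ih b

lemma sorted_head_min : ∀ (ts : List (Int × Int × Int × String))
    (b : Int × Int × Int × String) (t0 : List (Int × Int × Int × String)),
    ∃ rest, ts.foldl (fun acc x =>
        PySem.List.insertBy (fun a b => decide (keyA a < keyA b)) x acc) (b :: t0)
      = (ts.foldl (fun b t => if keyA t < keyA b then t else b) b) :: rest := by
  intro ts
  induction ts with
  | nil => intro b t0; exact ⟨t0, rfl⟩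
  | cons x xs ih =>
    intro b t0
    simp only [List.foldl_cons]
    by_cases h : keyA x < keyA b
    · have hi : PySem.List.insertBy (fun a b => decide (keyA a < keyA b)) x (b :: t0)
          = x :: b :: t0 := by simp [PySem.List.insertBy, h]
      rw [hi, if_pos h]
      exact ih x (b :: t0)
    · have hi : PySem.List.insertBy (fun a b => decide (keyA a < keyA b)) x (b :: t0)
          = b :: PySem.List.insertBy (fun a b => decide (keyA a < keyA b)) x t0 := by
        simp [PySem.List.insertBy, h]
      rw [hi, if_neg h]
      exact ih b _

lemma filterMapB_eq (domain : Option String) (es : List String) :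
    es.filterMap (fun e => (emailKeyB domain e).map (fun k => (k, e)))
    = (es.filterMap (entryA domain)).map fKE := by
  induction es with
  | nil => rfl
  | cons e es ih =>
    have hfm : (fun e => (emailKeyB domain e).map (fun k => (k, e))) e
        = (entryA domain e).map fKE := pointwise_key domain e
    simp only [List.filterMap_cons, hfm]
    cases entryA domain e <;> simp [ih, fKE]

-- ===== VERDICT (by name: the statement is the Claim_ definition above) =====
theorem pick_best_email_spec : Claim_equal_pick_best_email := by
  intro emails domain _
  unfold Spec_pick_best_email
  cases emails with
  | nil => rfl
  | cons first rest =>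
    simp only [pick_best_email, pick_best_email_alt, reduceCtorEq, if_false]
    rw [scoredA_eq domain (first :: rest) [], foldB_eq domain (first :: rest) none,
      filterMapB_eq domain (first :: rest)]
    simp only [List.nil_append]
    cases hs : (first :: rest).filterMap (entryA domain) with
    | nil => rfl
    | cons s0 srest =>
      simp only [List.map_cons, List.foldl_cons, reduceCtorEq, if_false, step2]
      rw [foldMin_some, foldMin_map]
      rw [PySem.List.sorted_eq_foldl_insertBy]
      simp only [List.foldl_cons]
      have h1 : PySem.List.insertBy (fun a b => decide (keyA a < keyA b)) s0 [] = [s0] := by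
        simp [PySem.List.insertBy]
      rw [h1]
      obtain ⟨restl, hr⟩ := sorted_head_min srest s0 []
      rw [hr]
      rfl
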